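-- pv_equiv track=rewrite | github.com/youngjaekwon/Algorithm | 프로그래머스/lv2/87390. n＾2 배열 자르기/n＾2 배열 자르기.py | solution
-- ===== SOURCE A (Python) =====
-- import math
--
-- def solution(n, left, right):
--     answer = []
--     x = math.ceil((left + 1) / n)
--     y = math.ceil((right + 1) / n)
--
--     for i in range(x, y + 1):
--         answer.extend([i] * i)
--         answer.extend(range(i + 1, n + 1))
--     a = left % n
--     return answer[a: a + right - left + 1]
-- ===== SOURCE B (Python) =====
-- def solution(n, left, right):
--     # value at flat index idx of the n x n matrix is max(row, col) + 1
--     return [max(idx // n, idx % n) + 1 for idx in range(left, right + 1)]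
-- ===== Notes on version B (the rewrite author's own statement) =====
-- stated objective: alternative
-- what changed: B computes each requested element directly as max(idx//n, idx%n)+1 over range(left, right+1), doing O(right-left+1) work independent of n, instead of materialising whole matrix rows and slicing; Pre_ restricts to the problem's natural domain (1 <= n, 0 <= left, and right < n*n unless right < left), outside which A's value (truncated or wrapped slices of out-of-range rows) is an accident of its row construction.
-- outside the precondition, e.g. on solution(1, 8, 11): A returns [9, 9, 9, 9], B returns [9, 10, 11, 12]; on solution(2, -5, -4): A returns [0, 1], B returns [2, 1]; on solution(-2, 0, 1): A returns [], B returns [1, 0]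
import Mathlib
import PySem

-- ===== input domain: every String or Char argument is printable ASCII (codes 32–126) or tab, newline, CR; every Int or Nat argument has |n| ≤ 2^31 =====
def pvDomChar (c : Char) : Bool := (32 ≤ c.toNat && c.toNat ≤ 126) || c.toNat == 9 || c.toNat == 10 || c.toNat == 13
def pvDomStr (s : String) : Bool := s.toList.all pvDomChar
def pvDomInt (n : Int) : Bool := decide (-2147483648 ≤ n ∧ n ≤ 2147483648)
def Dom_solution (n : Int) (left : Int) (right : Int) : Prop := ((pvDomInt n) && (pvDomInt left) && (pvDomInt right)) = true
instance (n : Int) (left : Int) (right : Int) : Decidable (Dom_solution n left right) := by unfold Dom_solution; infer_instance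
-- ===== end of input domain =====

-- B computes each requested element directly as max(idx//n, idx%n)+1 instead of building whole
-- matrix rows and slicing; proved equal to A on the problem's natural domain.


-- ===== PORT A =====
-- math.ceil((a)/n): exact integer ceiling division; on Dom (|ints| ≤ 2^31) Python's float
-- division followed by math.ceil is exact, so this is a faithful port there.
def ceilDiv (a : Int) (n : Int) : Int := -(PySem.Int.floordiv (-a) n)

def solution (n : Int) (left : Int) (right : Int) : List Int :=
  let x := ceilDiv (left + 1) n
  let y := ceilDiv (right + 1) n
  let answer := (PySem.List.pyRange x (y + 1) 1).foldl
    (fun acc i => (acc ++ List.replicate i.toNat i) ++ PySem.List.pyRange (i + 1) (n + 1) 1) []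
  let a := PySem.Int.mod left n
  PySem.List.slice answer (some a) (some (a + right - left + 1))

-- ===== PORT B =====
def solution_alt (n : Int) (left : Int) (right : Int) : List Int :=
  (PySem.List.pyRange left (right + 1) 1).map
    (fun idx => max (PySem.Int.floordiv idx n) (PySem.Int.mod idx n) + 1)

-- ===== PRECONDITION & SPEC =====
-- Pre_ excludes n = 0 (A raises ZeroDivisionError) and, as stated in the claim, otherwise restricts
-- to the problem's natural domain: 1 ≤ n, 0 ≤ left, and (unless the requested range is empty,
-- right < left) right < n*n, i.e. left/right are valid flat indices into the n×n matrix; outside it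
-- A's returned slices of out-of-range rows are accidents of its row construction.
def Pre_solution (n : Int) (left : Int) (right : Int) : Prop :=
  1 ≤ n ∧ 0 ≤ left ∧ (right < left ∨ right < n * n)
instance (n : Int) (left : Int) (right : Int) : Decidable (Pre_solution n left right) := by
  unfold Pre_solution; infer_instance

def pvWitness_solution : Int × Int × Int := (3, 2, 5)

def Spec_solution (n : Int) (left : Int) (right : Int) (out : List Int) : Prop := out = solution_alt n left right
instance (n : Int) (left : Int) (right : Int) (out : List Int) : Decidable (Spec_solution n left right out) := by unfold Spec_solution; infer_instance

-- ===== CLAIM (what is proved, stated in full; the proofs are below) =====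
def Claim_equal_solution : Prop := ∀ (n : Int) (left : Int) (right : Int), Dom_solution n left right → Pre_solution n left right → Spec_solution n left right (solution n left right)

-- ===== LEMMAS AND PROOFS =====

-- the per-element formula B uses
def pvF (n : Int) (idx : Int) : Int := max (PySem.Int.floordiv idx n) (PySem.Int.mod idx n) + 1

-- shifting a unit range
lemma pyRange_map_add (a b c : Int) :
    (PySem.List.pyRange a b 1).map (fun t => t + c) = PySem.List.pyRange (a + c) (b + c) 1 := by
  rw [PySem.List.pyRange_one, PySem.List.pyRange_one, List.map_map]
  have : b + c - (a + c) = b - a := by ring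
  rw [this]
  exact List.map_congr_left (fun k _ => by simp [Function.comp]; ring)

lemma pvF_eval (n q j : Int) (hn : 0 < n) (hj0 : 0 ≤ j) (hjn : j < n) :
    pvF n (q * n + j) = max q j + 1 := by
  have hq : PySem.Int.floordiv (q * n + j) n = q := by
    rw [PySem.Int.floordiv_eq_iff_of_pos hn]; constructor <;> nlinarith
  have hm : PySem.Int.mod (q * n + j) n = j := by
    have := PySem.Int.floordiv_mul_add_mod (q * n + j) n
    rw [hq] at this; omega
  rw [pvF, hq, hm]

-- one row of A equals B's formula mapped over the row's flat indices
lemma pv_row (n i : Int) (hn : 0 < n) (hi1 : 1 ≤ i) (hin : i ≤ n) :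
    List.replicate i.toNat i ++ PySem.List.pyRange (i + 1) (n + 1) 1
      = (PySem.List.pyRange ((i - 1) * n) (i * n) 1).map (pvF n) := by
  have hsplit : PySem.List.pyRange ((i - 1) * n) (i * n) 1
      = PySem.List.pyRange ((i - 1) * n) ((i - 1) * n + i) 1
        ++ PySem.List.pyRange ((i - 1) * n + i) (i * n) 1 := by
    apply PySem.List.pyRange_one_append <;> nlinarith
  rw [hsplit, List.map_append]
  congr 1
  · -- replicate part
    rw [PySem.List.pyRange_one]
    have hlen : ((i - 1) * n + i - (i - 1) * n).toNat = i.toNat := by omega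
    rw [hlen, List.map_map]
    have : ∀ k ∈ List.range i.toNat, (pvF n ∘ fun k : ℕ => (i - 1) * n + ↑k) k = i := by
      intro k hk
      simp only [List.mem_range] at hk
      have hki : (k : Int) < i := by omega
      have : pvF n ((i - 1) * n + (k : Int)) = max (i - 1) k + 1 :=
        pvF_eval n (i - 1) k hn (by omega) (by omega)
      simp only [Function.comp]
      rw [this]
      omega
    rw [List.map_congr_left this, List.map_const', List.length_range]
  · -- tail part [i+1 .. n]
    have h1 : PySem.List.pyRange ((i - 1) * n + i) (i * n) 1
        = (PySem.List.pyRange i n 1).map (fun t => t + (i - 1) * n) := by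
      rw [pyRange_map_add]; congr 1 <;> ring
    rw [h1, List.map_map]
    have : ∀ j ∈ PySem.List.pyRange i n 1, (pvF n ∘ fun t => t + (i - 1) * n) j = j + 1 := by
      intro j hj
      rw [PySem.List.mem_pyRange_one] at hj
      simp only [Function.comp]
      have : pvF n ((i - 1) * n + j) = max (i - 1) j + 1 :=
        pvF_eval n (i - 1) j hn (by omega) (by omega)
      rw [show j + (i - 1) * n = (i - 1) * n + j by ring, this]
      omega
    rw [List.map_congr_left this]
    exact (pyRange_map_add i n 1).symm

-- the whole loop of A builds the formula mapped over a contiguous block of flat indices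
lemma pv_build (n : Int) (hn : 0 < n) (k : Nat) :
    ∀ (x : Int) (acc : List Int), 1 ≤ x → x - 1 + k ≤ n →
    (PySem.List.pyRange x (x + k) 1).foldl
        (fun acc i => (acc ++ List.replicate i.toNat i) ++ PySem.List.pyRange (i + 1) (n + 1) 1) acc
      = acc ++ (PySem.List.pyRange ((x - 1) * n) ((x - 1 + k) * n) 1).map (pvF n) := by
  induction k with
  | zero =>
    intro x acc _ _
    rw [show x + (0 : Nat) = x by simp, PySem.List.pyRange_one_eq_nil (le_refl x)]
    rw [show x - 1 + (0 : Nat) = x - 1 by simp, PySem.List.pyRange_one_eq_nil (le_refl _)]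
    simp
  | succ m ih =>
    intro x acc hx hxn
    have hxn' : x ≤ n := by push_cast at hxn; omega
    rw [show ((m + 1 : Nat) : Int) = (m : Int) + 1 by push_cast; ring]
    rw [PySem.List.pyRange_one_cons (by omega), List.foldl_cons]
    rw [show x + ((m : Int) + 1) = (x + 1) + (m : Int) by ring]
    rw [ih (x + 1) _ (by omega) (by push_cast at hxn ⊢; omega)]
    simp only [List.append_assoc]
    congr 1
    rw [← List.append_assoc, pv_row n x hn hx hxn']
    rw [show x + 1 - 1 = x by ring, ← List.map_append,
        ← PySem.List.pyRange_one_append ((x - 1) * n) (x * n) ((x + (m : Int)) * n)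
          (by nlinarith) (by nlinarith)]
    congr 2
    ring

-- slicing a mapped unit range is the map over the sub-range
lemma pv_slice_map (g : Int → Int) (s b a len : Int) (ha : 0 ≤ a) (hlen : 0 ≤ len)
    (hend : s + a + len ≤ b) :
    PySem.List.slice ((PySem.List.pyRange s b 1).map g) (some a) (some (a + len))
      = (PySem.List.pyRange (s + a) (s + a + len) 1).map g := by
  have h1 : PySem.List.pyRange s b 1
      = PySem.List.pyRange s (s + a) 1 ++ (PySem.List.pyRange (s + a) (s + a + len) 1
        ++ PySem.List.pyRange (s + a + len) b 1) := by
    rw [← PySem.List.pyRange_one_append (s + a) (s + a + len) b (by omega) hend]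
    exact PySem.List.pyRange_one_append s (s + a) b (by omega) (by omega)
  have hl1 : ((PySem.List.pyRange s (s + a) 1).map g).length = a.toNat := by
    rw [List.length_map, PySem.List.length_pyRange_one]; omega
  have hl2 : ((PySem.List.pyRange (s + a) (s + a + len) 1).map g).length = len.toNat := by
    rw [List.length_map, PySem.List.length_pyRange_one]; omega
  rw [h1, List.map_append, List.map_append]
  rw [PySem.List.slice_toNat _ ha (by omega)]
  rw [← hl1, List.drop_left, hl1]
  rw [show (a + len).toNat - a.toNat
        = ((PySem.List.pyRange (s + a) (s + a + len) 1).map g).length by rw [hl2]; omega]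
  exact List.take_left

-- a slice of the empty list is empty
lemma pv_slice_nil (a b : Int) :
    PySem.List.slice ([] : List Int) (some a) (some b) = [] := by
  simp [PySem.List.slice]

-- ceiling of (a+1)/n is floor of a/n plus one
lemma pv_ceil_succ (a n : Int) (hn : 0 < n) :
    ceilDiv (a + 1) n = PySem.Int.floordiv a n + 1 := by
  rw [ceilDiv, PySem.Int.neg_floordiv_neg_eq_iff_of_pos hn]
  have h1 := PySem.Int.floordiv_mul_add_mod a n
  have h2 := PySem.Int.mod_nonneg a hn
  have h3 := PySem.Int.mod_lt a hn
  constructor <;> nlinarith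

-- ===== VERDICT (by name: the statement is the Claim_ definition above) =====
theorem solution_spec : Claim_equal_solution := by
  intro n left right _ hpre
  obtain ⟨hn, hl, hor⟩ := hpre
  have hn0 : 0 < n := hn
  simp only [Spec_solution, solution, solution_alt]
  rw [pv_ceil_succ left n hn0, pv_ceil_succ right n hn0]
  by_cases hlr : left ≤ right
  · -- the requested range is non-empty: both sides list the matrix values at indices left..right
    have hr : right < n * n := by
      rcases hor with h | h
      · omega
      · exact h
    set ql := PySem.Int.floordiv left n with hql
    set qr := PySem.Int.floordiv right n with hqr
    have hml0 := PySem.Int.mod_nonneg left hn0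
    have hmln := PySem.Int.mod_lt left hn0
    have hmr0 := PySem.Int.mod_nonneg right hn0
    have hmrn := PySem.Int.mod_lt right hn0
    have hqeq : ql * n + PySem.Int.mod left n = left := by
      rw [hql]; exact PySem.Int.floordiv_mul_add_mod left n
    have hreq : qr * n + PySem.Int.mod right n = right := by
      rw [hqr]; exact PySem.Int.floordiv_mul_add_mod right n
    have hql0 : 0 ≤ ql := by nlinarith
    have hqlr : ql ≤ qr := by nlinarith
    have hqrn : qr < n := by nlinarith
    have hk : (qr + 1) + 1 = (ql + 1) + ((qr - ql + 1).toNat : Int) := by omega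
    rw [hk, pv_build n hn0 (qr - ql + 1).toNat (ql + 1) [] (by omega) (by omega)]
    rw [List.nil_append]
    rw [show ql + 1 - 1 + ((qr - ql + 1).toNat : Int) = qr + 1 by omega,
        show ql + 1 - 1 = ql by ring]
    have hslice := pv_slice_map (pvF n) (ql * n) ((qr + 1) * n) (PySem.Int.mod left n)
        (right - left + 1) hml0 (by omega) (by nlinarith)
    rw [show PySem.Int.mod left n + right - left + 1
          = PySem.Int.mod left n + (right - left + 1) by ring, hslice]
    rw [show ql * n + PySem.Int.mod left n = left from hqeq]
    rw [show left + (right - left + 1) = right + 1 by ring]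
    rfl
  · -- empty requested range: both sides are []
    rw [PySem.List.pyRange_one_eq_nil (by omega : right + 1 ≤ left), List.map_nil]
    have hqle : PySem.Int.floordiv right n ≤ PySem.Int.floordiv left n := by
      rw [PySem.Int.floordiv_eq_ediv_of_pos hn0, PySem.Int.floordiv_eq_ediv_of_pos hn0]
      exact Int.ediv_le_ediv hn0 (by omega)
    by_cases hq : PySem.Int.floordiv right n < PySem.Int.floordiv left n
    · -- A's loop range is empty too
      rw [PySem.List.pyRange_one_eq_nil (by omega), List.foldl_nil]
      exact pv_slice_nil _ _
    · -- left and right fall in the same row: the slice bounds collapse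
      have hqq : PySem.Int.floordiv left n = PySem.Int.floordiv right n := by omega
      have hml := PySem.Int.floordiv_mul_add_mod left n
      have hmr := PySem.Int.floordiv_mul_add_mod right n
      have hmr0 := PySem.Int.mod_nonneg right hn0
      have hml0 := PySem.Int.mod_nonneg left hn0
      rw [hqq] at hml
      have hstop0 : 0 ≤ PySem.Int.mod left n + right - left + 1 := by linarith
      have hstopa : PySem.Int.mod left n + right - left + 1 ≤ PySem.Int.mod left n := by
        linarith
      rw [PySem.List.slice_toNat _ hml0 hstop0]
      rw [show (PySem.Int.mod left n + right - left + 1).toNat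
            - (PySem.Int.mod left n).toNat = 0 by omega, List.take_zero]
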